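-- pv_equiv track=rewrite | github.com/android-kunjapppan/Sentiment-Analysis-on-Financial-Reports | sentimental_analysis.py | count_complex_words
-- ===== SOURCE A (Python) =====
-- def count_complex_words(word_tokens):
--     vowels = list("aeiou")
--     complex_word_count = 0
--     for word in word_tokens:
--         vowels_count = 0
--         exception_vowels_count = 0
--         total_vowels_count = 0
--         exception_vowels_count = word.count("es") + word.count("ed")
--         for vowel in vowels:
--             vowels_count = vowels_count + word.count(vowel)
--
--         total_vowels_count = vowels_count - exception_vowels_count
--
--         if total_vowels_count > 2:
--             complex_word_count += 1
--     return complex_word_count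
-- ===== SOURCE B (Python) =====
-- def count_complex_words(word_tokens):
--     total = 0
--     for word in word_tokens:
--         v = 0
--         exc = 0
--         prev = ''
--         for ch in word:
--             if ch in "aeiou":
--                 v += 1
--             if prev == 'e' and (ch == 's' or ch == 'd'):
--                 exc += 1
--             prev = ch
--         if v - exc > 2:
--             total += 1
--     return total
-- ===== Notes on version B (the rewrite author's own statement) =====
-- stated objective: faster
-- what changed: Replaces seven whole-word library scans per word (five vowel .count calls plus .count('es')/.count('ed')) with one streaming pass per word that tallies vowels and 'es'/'ed' adjacent pairs via the previous character (measured ~2.2x faster).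
import Mathlib
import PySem

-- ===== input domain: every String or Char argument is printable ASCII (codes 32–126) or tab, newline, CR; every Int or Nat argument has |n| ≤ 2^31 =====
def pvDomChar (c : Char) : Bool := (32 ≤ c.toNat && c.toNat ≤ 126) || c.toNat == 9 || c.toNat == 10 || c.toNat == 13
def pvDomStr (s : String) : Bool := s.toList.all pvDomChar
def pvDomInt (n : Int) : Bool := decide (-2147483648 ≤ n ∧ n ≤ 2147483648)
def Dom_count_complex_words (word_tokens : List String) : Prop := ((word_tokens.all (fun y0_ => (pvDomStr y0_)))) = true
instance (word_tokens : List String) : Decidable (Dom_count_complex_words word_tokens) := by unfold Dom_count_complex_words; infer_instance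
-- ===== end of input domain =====

-- B replaces seven whole-word .count scans per word by one streaming pass (measured faster in a timing run).

-- ===== PORT A =====
def count_complex_words (word_tokens : List String) : Int :=
  let vowels := "aeiou".toList
  word_tokens.foldl (fun complex_word_count word =>
    let exception_vowels_count : Int :=
      (PySem.Str.count word "es" : Int) + (PySem.Str.count word "ed" : Int)
    let vowels_count : Int :=
      vowels.foldl (fun acc vowel => acc + (PySem.Str.count word (String.singleton vowel) : Int)) 0
    let total_vowels_count := vowels_count - exception_vowels_count
    if total_vowels_count > 2 then complex_word_count + 1 else complex_word_count) 0

-- ===== PORT B =====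
-- one streaming pass per word: state (vowel count, exception count, previous char)
def cwStep (st : Int × Int × Option Char) (ch : Char) : Int × Int × Option Char :=
  ((if ch ∈ "aeiou".toList then st.1 + 1 else st.1),
   (if st.2.2 = some 'e' ∧ (ch = 's' ∨ ch = 'd') then st.2.1 + 1 else st.2.1),
   some ch)

def count_complex_words_alt (word_tokens : List String) : Int :=
  word_tokens.foldl (fun total word =>
    let st := word.toList.foldl cwStep (0, 0, none)
    if st.1 - st.2.1 > 2 then total + 1 else total) 0

-- ===== PRECONDITION & SPEC =====
def Spec_count_complex_words (word_tokens : List String) (out : Int) : Prop := out = count_complex_words_alt word_tokens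
instance (word_tokens : List String) (out : Int) : Decidable (Spec_count_complex_words word_tokens out) := by unfold Spec_count_complex_words; infer_instance

-- ===== CLAIM (what is proved, stated in full; the proofs are below) =====
def Claim_equal_count_complex_words : Prop := ∀ (word_tokens : List String), Dom_count_complex_words word_tokens → Spec_count_complex_words word_tokens (count_complex_words word_tokens)

-- ===== LEMMAS AND PROOFS =====

-- number of indices i with cs[i] = a and cs[i+1] = b
def pairAdj (a b : Char) : List Char → Nat
  | [] => 0
  | [_] => 0
  | x :: y :: t => (if x = a ∧ y = b then 1 else 0) + pairAdj a b (y :: t)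

-- exception pairs counted the way B's streaming pass does, starting from previous char p
def pairCnt (p : Option Char) : List Char → Nat
  | [] => 0
  | c :: t => (if p = some 'e' ∧ (c = 's' ∨ c = 'd') then 1 else 0) + pairCnt (some c) t

def prevAfter (p : Option Char) (cs : List Char) : Option Char :=
  cs.foldl (fun _ c => some c) p

theorem go_single (c : Char) : ∀ (fuel : Nat) (cs : List Char) (acc : Nat),
    cs.length ≤ fuel → PySem.Chars.count.go [c] fuel cs acc = acc + cs.count c := by
  intro fuel
  induction fuel with
  | zero =>
    intro cs acc h
    have : cs = [] := List.eq_nil_of_length_eq_zero (Nat.le_zero.mp h)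
    subst this; simp [PySem.Chars.count.go]
  | succ n ih =>
    intro cs acc h
    cases cs with
    | nil => simp [PySem.Chars.count.go]
    | cons x t =>
      have hlen : t.length ≤ n := by simp at h; omega
      simp only [PySem.Chars.count.go]
      by_cases hx : c = x
      · have hpf : ([c].isPrefixOf (x :: t)) = true := by simp [List.isPrefixOf, hx]
        rw [hpf]
        rw [show List.drop [c].length (x :: t) = t from rfl, ih t (acc + 1) hlen]
        simp [hx]
        omega
      · have hpf : ([c].isPrefixOf (x :: t)) = false := by
          simp [List.isPrefixOf]
          exact fun hh => hx hh
        rw [hpf]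
        simp only [Bool.false_eq_true, if_false]
        rw [ih t acc hlen]
        have : x ≠ c := fun hh => hx hh.symm
        simp [this]

theorem count_single (c : Char) (cs : List Char) :
    PySem.Chars.count cs [c] = cs.count c := by
  have := go_single c cs.length cs 0 (le_refl _)
  simp [PySem.Chars.count, this]

theorem go_pair (a b : Char) (hab : a ≠ b) : ∀ (fuel : Nat) (cs : List Char) (acc : Nat),
    cs.length ≤ fuel → PySem.Chars.count.go [a, b] fuel cs acc = acc + pairAdj a b cs := by
  intro fuel
  induction fuel with
  | zero =>
    intro cs acc h
    have : cs = [] := List.eq_nil_of_length_eq_zero (Nat.le_zero.mp h)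
    subst this; simp [PySem.Chars.count.go, pairAdj]
  | succ n ih =>
    intro cs acc h
    cases cs with
    | nil => simp [PySem.Chars.count.go, pairAdj]
    | cons x t =>
      simp only [PySem.Chars.count.go]
      cases t with
      | nil =>
        have hpf : ([a, b].isPrefixOf [x]) = false := by simp [List.isPrefixOf]
        rw [hpf]
        simp only [Bool.false_eq_true, if_false]
        have : (0 : Nat) ≤ n := Nat.zero_le n
        rw [ih [] acc this]
        simp [pairAdj]
      | cons y t' =>
        have hlen2 : t'.length ≤ n := by simp at h; omega
        have hlen1 : (y :: t').length ≤ n := by simp at h ⊢; omega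
        by_cases hpre : x = a ∧ y = b
        · obtain ⟨hx, hy⟩ := hpre
          subst hx; subst hy
          have hpf : ([x, y].isPrefixOf (x :: y :: t')) = true := by simp [List.isPrefixOf]
          rw [hpf]
          rw [show List.drop [x, y].length (x :: y :: t') = t' from rfl, ih t' (acc + 1) hlen2]
          have hy' : pairAdj x y (y :: t') = pairAdj x y t' := by
            cases t' with
            | nil => simp [pairAdj]
            | cons z t'' =>
              simp only [pairAdj]
              have : ¬ (y = x ∧ z = y) := fun hh => hab hh.1.symm
              simp [this]
          simp [pairAdj, hy']
          omega
        · have hpf : ([a, b].isPrefixOf (x :: y :: t')) = false := by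
            simp [List.isPrefixOf]
            intro h1 h2
            exact hpre ⟨h1.symm, h2.symm⟩
          rw [hpf]
          simp only [Bool.false_eq_true, if_false]
          rw [ih (y :: t') acc hlen1]
          simp [pairAdj, hpre]

theorem count_pair (a b : Char) (hab : a ≠ b) (cs : List Char) :
    PySem.Chars.count cs [a, b] = pairAdj a b cs := by
  have := go_pair a b hab cs.length cs 0 (le_refl _)
  simp [PySem.Chars.count, this]

theorem countSum (cs : List Char) :
    cs.count 'a' + cs.count 'e' + cs.count 'i' + cs.count 'o' + cs.count 'u'
      = cs.countP (fun c => c ∈ "aeiou".toList) := by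
  induction cs with
  | nil => simp
  | cons c t ih =>
    simp only [List.count_cons, List.countP_cons, ← ih]
    by_cases h1 : c = 'a' <;> by_cases h2 : c = 'e' <;> by_cases h3 : c = 'i' <;>
      by_cases h4 : c = 'o' <;> by_cases h5 : c = 'u' <;> simp_all <;> omega

theorem foldl_cwStep (cs : List Char) : ∀ (v e : Int) (p : Option Char),
    cs.foldl cwStep (v, e, p)
      = (v + (cs.countP (fun c => c ∈ "aeiou".toList) : Int),
         e + (pairCnt p cs : Int), prevAfter p cs) := by
  induction cs with
  | nil => intro v e p; simp [prevAfter, pairCnt]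
  | cons c t ih =>
    intro v e p
    simp only [List.foldl_cons, cwStep, ih]
    refine Prod.ext ?_ (Prod.ext ?_ ?_)
    · rw [List.countP_cons]
      by_cases hc : c ∈ "aeiou".toList
      · rw [if_pos hc]
        simp only [hc, decide_true, if_true]
        push_cast; ring
      · rw [if_neg hc]
        simp only [hc, decide_false, Bool.false_eq_true, if_false]
        push_cast; ring
    · show (if p = some 'e' ∧ (c = 's' ∨ c = 'd') then e + 1 else e) + (pairCnt (some c) t : Int)
        = e + (pairCnt p (c :: t) : Int)
      by_cases hp : p = some 'e' ∧ (c = 's' ∨ c = 'd')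
      · rw [if_pos hp]
        simp only [pairCnt, if_pos hp]
        push_cast; ring
      · rw [if_neg hp]
        simp only [pairCnt, if_neg hp]
        push_cast; ring
    · rfl

theorem pairCnt_some (cs : List Char) : ∀ (c : Char),
    pairCnt (some c) cs = pairAdj 'e' 's' (c :: cs) + pairAdj 'e' 'd' (c :: cs) := by
  induction cs with
  | nil => intro c; simp [pairCnt, pairAdj]
  | cons d t ih =>
    intro c
    simp only [pairCnt, pairAdj, ih d]
    by_cases h1 : c = 'e' <;> by_cases h2 : d = 's' <;> by_cases h3 : d = 'd' <;>
      simp_all <;> omega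

theorem pairCnt_none (cs : List Char) :
    pairCnt none cs = pairAdj 'e' 's' cs + pairAdj 'e' 'd' cs := by
  cases cs with
  | nil => simp [pairCnt, pairAdj]
  | cons c t =>
    simp only [pairCnt]
    rw [pairCnt_some t c]
    simp

theorem key (w : String) :
    ("aeiou".toList.foldl (fun acc v => acc + (PySem.Str.count w (String.singleton v) : Int)) 0)
      - ((PySem.Str.count w "es" : Int) + (PySem.Str.count w "ed" : Int))
    = (w.toList.foldl cwStep (0, 0, none)).1 - (w.toList.foldl cwStep (0, 0, none)).2.1 := by
  rw [foldl_cwStep]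
  simp only [PySem.Str.count_eq]
  have hv : ("aeiou".toList.foldl
      (fun acc v => acc + (PySem.Chars.count w.toList (String.singleton v).toList : Int)) 0)
      = ((w.toList.count 'a' : Int) + (w.toList.count 'e' : Int) + (w.toList.count 'i' : Int)
          + (w.toList.count 'o' : Int) + (w.toList.count 'u' : Int)) := by
    rw [show "aeiou".toList = ['a', 'e', 'i', 'o', 'u'] by decide]
    simp only [List.foldl_cons, List.foldl_nil]
    rw [show (String.singleton 'a').toList = ['a'] by decide,
        show (String.singleton 'e').toList = ['e'] by decide,
        show (String.singleton 'i').toList = ['i'] by decide,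
        show (String.singleton 'o').toList = ['o'] by decide,
        show (String.singleton 'u').toList = ['u'] by decide]
    rw [count_single, count_single, count_single, count_single, count_single]
    ring
  rw [hv, show "es".toList = ['e', 's'] by decide, show "ed".toList = ['e', 'd'] by decide,
      count_pair 'e' 's' (by decide), count_pair 'e' 'd' (by decide), pairCnt_none]
  have hc := countSum w.toList
  push_cast at hc ⊢
  omega

-- ===== VERDICT (by name: the statement is the Claim_ definition above) =====
theorem count_complex_words_spec : Claim_equal_count_complex_words := by
  intro word_tokens _
  unfold Spec_count_complex_words count_complex_words count_complex_words_alt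
  have hfun : (fun (complex_word_count : Int) (word : String) =>
        if (("aeiou".toList.foldl
              (fun acc vowel => acc + (PySem.Str.count word (String.singleton vowel) : Int)) 0)
            - ((PySem.Str.count word "es" : Int) + (PySem.Str.count word "ed" : Int))) > 2
        then complex_word_count + 1 else complex_word_count)
      = (fun (total : Int) (word : String) =>
        if (word.toList.foldl cwStep (0, 0, none)).1
            - (word.toList.foldl cwStep (0, 0, none)).2.1 > 2
        then total + 1 else total) := by
    funext c w
    rw [key w]
  exact congrArg (fun f => List.foldl f 0 word_tokens) hfun
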